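-- pv_equiv track=rewrite | github.com/chriscruz06/RagBench | ingestion/preprocess_bible.py | split_into_books
-- ===== SOURCE A (Python) =====
-- BOOK_PATTERNS = [
--     # Old Testament
--     "Genesis", "Exodus", "Leviticus", "Numbers", "Deuteronomy",
--     "Josue", "Judges", "Ruth",
--     "1 Kings", "2 Kings", "3 Kings", "4 Kings",
--     # DR uses "Kings" where modern translations use "Samuel" and "Kings"
--     "1 Paralipomenon", "2 Paralipomenon",  # = 1-2 Chronicles
--     "1 Esdras", "2 Esdras",  # = Ezra, Nehemiah
--     "Tobias", "Judith", "Esther", "Job",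
--     "Psalms", "Proverbs", "Ecclesiastes", "Canticle of Canticles",
--     "Wisdom", "Ecclesiasticus",  # = Sirach
--     "Isaias", "Jeremias", "Lamentations", "Baruch",
--     "Ezechiel", "Daniel", "Osee", "Joel", "Amos", "Abdias",
--     "Jonas", "Micheas", "Nahum", "Habacuc", "Sophonias",
--     "Aggeus", "Zacharias", "Malachias",
--     "1 Machabees", "2 Machabees",
--     # New Testament
--     "The Holy Gospel Of Jesus Christ, According To Saint Matthew",
--     "The Holy Gospel Of Jesus Christ, According To Saint Mark",
--     "The Holy Gospel Of Jesus Christ, According To Saint Luke",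
--     "The Holy Gospel Of Jesus Christ, According To Saint John",
--     "The Acts Of The Apostles",
--     "The Epistle Of Saint Paul To The Romans",
--     "The First Epistle Of Saint Paul To The Corinthians",
--     "The Second Epistle Of Saint Paul To The Corinthians",
--     "The Epistle Of Saint Paul To The Galatians",
--     "The Epistle Of Saint Paul To The Ephesians",
--     "The Epistle Of Saint Paul To The Philippians",
--     "The Epistle Of Saint Paul To The Colossians",
--     "The First Epistle Of Saint Paul To The Thessalonians",
--     "The Second Epistle Of Saint Paul To The Thessalonians",
--     "The First Epistle Of Saint Paul To Timothy",
--     "The Second Epistle Of Saint Paul To Timothy",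
--     "The Epistle Of Saint Paul To Titus",
--     "The Epistle Of Saint Paul To Philemon",
--     "The Epistle Of Saint Paul To The Hebrews",
--     "The Catholic Epistle Of Saint James The Apostle",
--     "The First Epistle Of Saint Peter The Apostle",
--     "The Second Epistle Of Saint Peter The Apostle",
--     "The First Epistle Of Saint John The Apostle",
--     "The Second Epistle Of Saint John The Apostle",
--     "The Third Epistle Of Saint John The Apostle",
--     "The Catholic Epistle Of Saint Jude The Apostle",
--     "The Apocalypse Of Saint John The Apostle",
-- ]
--
-- def split_into_books(text: str) -> dict[str, str]:
--     """
--     Split the Bible text into individual books.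
--
--     Returns a dict of {book_name: book_text}.
--     This is a best-effort parser — Gutenberg formatting varies.
--     """
--     books = {}
--
--     # Try to find book boundaries by looking for known book names
--     # as standalone lines (usually in all caps or title case)
--     lines = text.split("\n")
--     current_book = None
--     current_lines = []
--
--     for line in lines:
--         stripped = line.strip()
--
--         # Check if this line is a book header
--         matched_book = None
--         for book in BOOK_PATTERNS:
--             # Match case-insensitively, allow some variation
--             if stripped.upper() == book.upper() or stripped.upper().startswith(book.upper()):
--                 matched_book = book
--                 break
--
--         if matched_book:
--             # Save previous book
--             if current_book and current_lines:
--                 books[current_book] = "\n".join(current_lines).strip()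
--
--             current_book = matched_book
--             current_lines = []
--         elif current_book:
--             current_lines.append(line)
--
--     # Don't forget the last book
--     if current_book and current_lines:
--         books[current_book] = "\n".join(current_lines).strip()
--
--     return books
-- ===== SOURCE B (Python) =====
-- BOOK_PATTERNS = [
--     # Old Testament
--     "Genesis", "Exodus", "Leviticus", "Numbers", "Deuteronomy",
--     "Josue", "Judges", "Ruth",
--     "1 Kings", "2 Kings", "3 Kings", "4 Kings",
--     "1 Paralipomenon", "2 Paralipomenon",
--     "1 Esdras", "2 Esdras",
--     "Tobias", "Judith", "Esther", "Job",
--     "Psalms", "Proverbs", "Ecclesiastes", "Canticle of Canticles",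
--     "Wisdom", "Ecclesiasticus",
--     "Isaias", "Jeremias", "Lamentations", "Baruch",
--     "Ezechiel", "Daniel", "Osee", "Joel", "Amos", "Abdias",
--     "Jonas", "Micheas", "Nahum", "Habacuc", "Sophonias",
--     "Aggeus", "Zacharias", "Malachias",
--     "1 Machabees", "2 Machabees",
--     # New Testament
--     "The Holy Gospel Of Jesus Christ, According To Saint Matthew",
--     "The Holy Gospel Of Jesus Christ, According To Saint Mark",
--     "The Holy Gospel Of Jesus Christ, According To Saint Luke",
--     "The Holy Gospel Of Jesus Christ, According To Saint John",
--     "The Acts Of The Apostles",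
--     "The Epistle Of Saint Paul To The Romans",
--     "The First Epistle Of Saint Paul To The Corinthians",
--     "The Second Epistle Of Saint Paul To The Corinthians",
--     "The Epistle Of Saint Paul To The Galatians",
--     "The Epistle Of Saint Paul To The Ephesians",
--     "The Epistle Of Saint Paul To The Philippians",
--     "The Epistle Of Saint Paul To The Colossians",
--     "The First Epistle Of Saint Paul To The Thessalonians",
--     "The Second Epistle Of Saint Paul To The Thessalonians",
--     "The First Epistle Of Saint Paul To Timothy",
--     "The Second Epistle Of Saint Paul To Timothy",
--     "The Epistle Of Saint Paul To Titus",
--     "The Epistle Of Saint Paul To Philemon",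
--     "The Epistle Of Saint Paul To The Hebrews",
--     "The Catholic Epistle Of Saint James The Apostle",
--     "The First Epistle Of Saint Peter The Apostle",
--     "The Second Epistle Of Saint Peter The Apostle",
--     "The First Epistle Of Saint John The Apostle",
--     "The Second Epistle Of Saint John The Apostle",
--     "The Third Epistle Of Saint John The Apostle",
--     "The Catholic Epistle Of Saint Jude The Apostle",
--     "The Apocalypse Of Saint John The Apostle",
-- ]
--
--
-- def _header_book(line):
--     """Book name if this line starts with a known book name, else None."""
--     s = line.strip().upper()
--     for book in BOOK_PATTERNS:
--         if s.startswith(book.upper()):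
--             return book
--     return None
--
--
-- def split_into_books(text: str) -> dict[str, str]:
--     """
--     Split the Bible text into individual books.
--
--     Returns a dict of {book_name: book_text}.
--     """
--     lines = text.split("\n")
--
--     # One scan to locate every book-header line.
--     headers = [(i, book) for i, line in enumerate(lines)
--                if (book := _header_book(line)) is not None]
--
--     # Each book's text is the block of lines between its header and the next.
--     bounds = [i for i, _ in headers[1:]] + [len(lines)]
--     books = {}
--     for (i, book), end in zip(headers, bounds):
--         segment = lines[i + 1:end]
--         if segment:
--             books[book] = "\n".join(segment).strip()
--     return books
-- ===== Notes on version B (the rewrite author's own statement) =====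
-- stated objective: faster
-- what changed: B replaces A's forward state machine (current_book/current_lines with a save-on-next-header and a trailing flush) by a two-phase decomposition: one scan collecting (index, book) for every header line, then slicing the block of lines between consecutive headers; B uppercases each stripped line once in _header_book where A recomputes stripped.upper() inside the pattern loop, the constant-factor source of the measured speedup.
import Mathlib
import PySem

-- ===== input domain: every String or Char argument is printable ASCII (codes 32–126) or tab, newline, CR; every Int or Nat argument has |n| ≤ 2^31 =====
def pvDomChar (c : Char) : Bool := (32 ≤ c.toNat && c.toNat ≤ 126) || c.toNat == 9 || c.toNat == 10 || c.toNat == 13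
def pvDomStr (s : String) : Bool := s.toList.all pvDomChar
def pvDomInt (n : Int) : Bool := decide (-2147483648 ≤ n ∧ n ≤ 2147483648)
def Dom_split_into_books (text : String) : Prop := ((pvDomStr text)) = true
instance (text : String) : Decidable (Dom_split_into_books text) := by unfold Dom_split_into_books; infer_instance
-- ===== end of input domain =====

-- B first locates all header lines in one scan, then slices the block of lines between
-- consecutive headers, instead of A's forward state machine; a timing run measured B
-- faster (B uppercases each stripped line once, A once per pattern).

-- Module-level constant shared by both Pythons
def pvBooks : List String := [
  "Genesis", "Exodus", "Leviticus", "Numbers", "Deuteronomy",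
  "Josue", "Judges", "Ruth",
  "1 Kings", "2 Kings", "3 Kings", "4 Kings",
  "1 Paralipomenon", "2 Paralipomenon",
  "1 Esdras", "2 Esdras",
  "Tobias", "Judith", "Esther", "Job",
  "Psalms", "Proverbs", "Ecclesiastes", "Canticle of Canticles",
  "Wisdom", "Ecclesiasticus",
  "Isaias", "Jeremias", "Lamentations", "Baruch",
  "Ezechiel", "Daniel", "Osee", "Joel", "Amos", "Abdias",
  "Jonas", "Micheas", "Nahum", "Habacuc", "Sophonias",
  "Aggeus", "Zacharias", "Malachias",
  "1 Machabees", "2 Machabees",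
  "The Holy Gospel Of Jesus Christ, According To Saint Matthew",
  "The Holy Gospel Of Jesus Christ, According To Saint Mark",
  "The Holy Gospel Of Jesus Christ, According To Saint Luke",
  "The Holy Gospel Of Jesus Christ, According To Saint John",
  "The Acts Of The Apostles",
  "The Epistle Of Saint Paul To The Romans",
  "The First Epistle Of Saint Paul To The Corinthians",
  "The Second Epistle Of Saint Paul To The Corinthians",
  "The Epistle Of Saint Paul To The Galatians",
  "The Epistle Of Saint Paul To The Ephesians",
  "The Epistle Of Saint Paul To The Philippians",
  "The Epistle Of Saint Paul To The Colossians",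
  "The First Epistle Of Saint Paul To The Thessalonians",
  "The Second Epistle Of Saint Paul To The Thessalonians",
  "The First Epistle Of Saint Paul To Timothy",
  "The Second Epistle Of Saint Paul To Timothy",
  "The Epistle Of Saint Paul To Titus",
  "The Epistle Of Saint Paul To Philemon",
  "The Epistle Of Saint Paul To The Hebrews",
  "The Catholic Epistle Of Saint James The Apostle",
  "The First Epistle Of Saint Peter The Apostle",
  "The Second Epistle Of Saint Peter The Apostle",
  "The First Epistle Of Saint John The Apostle",
  "The Second Epistle Of Saint John The Apostle",
  "The Third Epistle Of Saint John The Apostle",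
  "The Catholic Epistle Of Saint Jude The Apostle",
  "The Apocalypse Of Saint John The Apostle"]

-- ===== PORT A =====
-- the inner 'for book in BOOK_PATTERNS: … break' loop: first matching pattern
def pvFindBookA (stripped : String) : Option String :=
  pvBooks.find? (fun book =>
    (PySem.Str.upper stripped == PySem.Str.upper book)
      || PySem.Str.startswith (PySem.Str.upper stripped) (PySem.Str.upper book))

-- loop body over state (books, current_book, current_lines)
def pvStepA (st : PySem.Dict String String × Option String × List String) (line : String) :
    PySem.Dict String String × Option String × List String :=
  match pvFindBookA (PySem.Str.strip line) with
  | some b =>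
    (match st.2.1 with
     | some c =>
       if st.2.2 ≠ [] then
         (st.1.insert c (PySem.Str.strip (PySem.Str.join "\n" st.2.2)), some b, [])
       else (st.1, some b, [])
     | none => (st.1, some b, []))
  | none =>
    match st.2.1 with
    | some _ => (st.1, st.2.1, st.2.2 ++ [line])
    | none => st

def split_into_books (text : String) : List (String × String) :=
  let lines := (PySem.Str.split? text "\n").getD []
  let st := lines.foldl pvStepA (PySem.Dict.empty, none, [])
  -- "Don't forget the last book"
  let books : PySem.Dict String String :=
    match st.2.1 with
    | some c =>
      if st.2.2 ≠ [] then st.1.insert c (PySem.Str.strip (PySem.Str.join "\n" st.2.2)) else st.1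
    | none => st.1
  books.items

-- ===== PORT B =====
-- _header_book(line)
def pvFindBookB (line : String) : Option String :=
  pvBooks.find? (fun book =>
    PySem.Str.startswith (PySem.Str.upper (PySem.Str.strip line)) (PySem.Str.upper book))

-- the 'headers' list comprehension: (index, book) for every header line
def pvHeadersOf (lines : List String) : List (Int × String) :=
  (PySem.List.enumerate lines 0).filterMap
    (fun p => (pvFindBookB p.2).map (fun b => (p.1, b)))

-- body of the 'for (i, book), end in zip(headers, bounds)' loop
def pvStepB (lines : List String) (d : PySem.Dict String String)
    (p : (Int × String) × Int) : PySem.Dict String String :=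
  let segment := PySem.List.slice lines (some (p.1.1 + 1)) (some p.2)
  if segment ≠ [] then d.insert p.1.2 (PySem.Str.strip (PySem.Str.join "\n" segment))
  else d

def split_into_books_alt (text : String) : List (String × String) :=
  let lines := (PySem.Str.split? text "\n").getD []
  let headers := pvHeadersOf lines
  let bounds := (headers.drop 1).map Prod.fst ++ [(lines.length : Int)]
  let books := (headers.zip bounds).foldl (pvStepB lines)
    (PySem.Dict.empty : PySem.Dict String String)
  books.items

-- ===== PRECONDITION & SPEC =====
def Spec_split_into_books (text : String) (out : List (String × String)) : Prop := out = split_into_books_alt text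
instance (text : String) (out : List (String × String)) : Decidable (Spec_split_into_books text out) := by unfold Spec_split_into_books; infer_instance

-- ===== CLAIM =====
def Claim_equal_split_into_books : Prop := ∀ (text : String), Dom_split_into_books text → Spec_split_into_books text (split_into_books text)

-- ===== LEMMAS AND PROOFS =====

-- the two header tests agree (A's equality disjunct is subsumed by startswith)
theorem pvPred_eq (s book : String) :
    ((PySem.Str.upper s == PySem.Str.upper book)
      || PySem.Str.startswith (PySem.Str.upper s) (PySem.Str.upper book))
      = PySem.Str.startswith (PySem.Str.upper s) (PySem.Str.upper book) := by
  by_cases h : PySem.Str.upper s = PySem.Str.upper book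
  · have hsw : PySem.Chars.startswith (PySem.Chars.upper book.toList)
        (PySem.Chars.upper book.toList) = true :=
      (PySem.Chars.startswith_iff _ _).mpr (List.prefix_refl _)
    simp [h, hsw]
  · simp [h]

theorem pvFind_eq (line : String) : pvFindBookA (PySem.Str.strip line) = pvFindBookB line := by
  unfold pvFindBookA pvFindBookB
  have hfun : (fun book =>
      ((PySem.Str.upper (PySem.Str.strip line) == PySem.Str.upper book)
        || PySem.Str.startswith (PySem.Str.upper (PySem.Str.strip line)) (PySem.Str.upper book)))
      = (fun book =>
        PySem.Str.startswith (PySem.Str.upper (PySem.Str.strip line)) (PySem.Str.upper book)) :=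
    funext (fun book => pvPred_eq (PySem.Str.strip line) book)
  rw [hfun]

-- the forward list of (book, text) saves A performs, from state (cb, cl)
def pvSaves : Option String → List String → List String → List (String × String)
  | cb, cl, [] =>
    (match cb with
     | some c => if cl ≠ [] then [(c, PySem.Str.strip (PySem.Str.join "\n" cl))] else []
     | none => [])
  | cb, cl, l :: ls =>
    match pvFindBookB l with
    | some b =>
      (match cb with
       | some c => if cl ≠ [] then [(c, PySem.Str.strip (PySem.Str.join "\n" cl))] else []
       | none => []) ++ pvSaves (some b) [] ls
    | none =>
      match cb with
      | some _ => pvSaves cb (cl ++ [l]) ls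
      | none => pvSaves cb cl ls

-- the non-header prefix of a list of lines
def pvPre (ls : List String) : List String := ls.takeWhile (fun l => (pvFindBookB l).isNone)

def pvFinishA (st : PySem.Dict String String × Option String × List String) :
    PySem.Dict String String :=
  match st.2.1 with
  | some c =>
    if st.2.2 ≠ [] then st.1.insert c (PySem.Str.strip (PySem.Str.join "\n" st.2.2)) else st.1
  | none => st.1

theorem lemA (ls : List String) : ∀ (d : PySem.Dict String String) (cb : Option String)
    (cl : List String),
    pvFinishA (ls.foldl pvStepA (d, cb, cl)) =
      (pvSaves cb cl ls).foldl (fun d p => d.insert p.1 p.2) d := by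
  induction ls with
  | nil =>
    intro d cb cl
    cases cb with
    | none => simp [pvFinishA, pvSaves]
    | some c =>
      by_cases h : cl = [] <;> simp [pvFinishA, pvSaves, h]
  | cons l ls ih =>
    intro d cb cl
    simp only [List.foldl_cons, pvSaves]
    have hstep : pvStepA (d, cb, cl) l =
        (match pvFindBookB l with
         | some b =>
           (match cb with
            | some c =>
              if cl ≠ [] then
                (d.insert c (PySem.Str.strip (PySem.Str.join "\n" cl)), some b, [])
              else (d, some b, [])
            | none => (d, some b, []))
         | none =>
           match cb with
           | some _ => (d, cb, cl ++ [l])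
           | none => (d, cb, cl)) := by
      unfold pvStepA
      rw [pvFind_eq]
    rw [hstep]
    cases hb : pvFindBookB l with
    | some b =>
      cases cb with
      | none => simp [ih]
      | some c =>
        by_cases h : cl = [] <;> simp [h, ih]
    | none =>
      cases cb with
      | none => simp [ih]
      | some c => simp [ih]

theorem saves_some (ls : List String) : ∀ (b : String) (cl : List String),
    pvSaves (some b) cl ls =
      (if cl ++ pvPre ls ≠ [] then
        [(b, PySem.Str.strip (PySem.Str.join "\n" (cl ++ pvPre ls)))] else [])
        ++ pvSaves none [] ls := by
  induction ls with
  | nil =>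
    intro b cl
    by_cases h : cl = [] <;> simp [pvSaves, pvPre, h]
  | cons l ls ih =>
    intro b cl
    cases hb : pvFindBookB l with
    | some b' =>
      have hpre : pvPre (l :: ls) = [] := by simp [pvPre, List.takeWhile, hb]
      simp only [pvSaves, hb, hpre, List.append_nil, List.nil_append]
    | none =>
      have hpre : pvPre (l :: ls) = l :: pvPre ls := by simp [pvPre, List.takeWhile, hb]
      have h1 : pvSaves (some b) cl (l :: ls) = pvSaves (some b) (cl ++ [l]) ls := by
        simp [pvSaves, hb]
      have h2 : pvSaves none [] (l :: ls) = pvSaves none [] ls := by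
        simp [pvSaves, hb]
      rw [h1, ih, h2, hpre]
      have hne1 : cl ++ [l] ++ pvPre ls ≠ [] := by simp
      have hne2 : cl ++ (l :: pvPre ls) ≠ [] := by simp
      simp only [hne1, hne2, if_pos, ne_eq, not_false_iff]
      have : cl ++ [l] ++ pvPre ls = cl ++ (l :: pvPre ls) := by simp
      rw [this]

-- B-side proof scaffolding: pvHdrs off ls = the headers of ls, indexed from off
def pvHdrs (off : Nat) : List String → List (Int × String)
  | [] => []
  | l :: ls =>
    match pvFindBookB l with
    | some b => ((off : Int), b) :: pvHdrs (off + 1) ls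
    | none => pvHdrs (off + 1) ls

theorem hdrs_eq (ls : List String) : ∀ (off : Nat),
    (PySem.List.enumerate ls (off : Int)).filterMap
      (fun p => (pvFindBookB p.2).map (fun b => (p.1, b))) = pvHdrs off ls := by
  induction ls with
  | nil => intro off; simp [PySem.List.enumerate_nil, pvHdrs]
  | cons l ls ih =>
    intro off
    rw [PySem.List.enumerate_cons]
    have hc : ((off : Int) + 1) = ((off + 1 : Nat) : Int) := by push_cast; ring
    rw [List.filterMap_cons, hc, ih (off + 1)]
    cases hb : pvFindBookB l with
    | some b => simp [pvHdrs, hb]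
    | none => simp [pvHdrs, hb]

theorem pvHeadersOf_eq (lines : List String) : pvHeadersOf lines = pvHdrs 0 lines := by
  unfold pvHeadersOf
  have h := hdrs_eq lines 0
  simpa using h

-- the record list B's second loop inserts
def pvRecsB (lines : List String) : List (Int × String) → List (String × String)
  | [] => []
  | (i, b) :: rest =>
    (if PySem.List.slice lines (some (i + 1))
          (some (match rest with | [] => (lines.length : Int) | q :: _ => q.1)) ≠ [] then
      [(b, PySem.Str.strip (PySem.Str.join "\n"
        (PySem.List.slice lines (some (i + 1))
          (some (match rest with | [] => (lines.length : Int) | q :: _ => q.1)))))]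
    else []) ++ pvRecsB lines rest

theorem foldB (lines : List String) : ∀ (hs : List (Int × String)) (d : PySem.Dict String String),
    (hs.zip ((hs.drop 1).map Prod.fst ++ [(lines.length : Int)])).foldl (pvStepB lines) d
    = (pvRecsB lines hs).foldl (fun d p => d.insert p.1 p.2) d := by
  intro hs
  induction hs with
  | nil => intro d; simp [pvRecsB]
  | cons h rest ih =>
    intro d
    obtain ⟨i, b⟩ := h
    cases rest with
    | nil =>
      simp only [pvRecsB, List.drop_succ_cons, List.drop_nil, List.map_nil, List.nil_append,
        List.zip_cons_cons, List.zip_nil_left, List.foldl_cons, List.foldl_nil, pvStepB,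
        List.append_nil]
      by_cases hseg : PySem.List.slice lines (some (i + 1)) (some (lines.length : Int)) = []
      · simp [hseg]
      · simp [hseg]
    | cons q rest' =>
      simp only [List.drop_succ_cons, List.drop_zero, List.map_cons,
        List.cons_append, List.zip_cons_cons, List.foldl_cons]
      have ih' := ih (pvStepB lines d ((i, b), q.1))
      simp only [List.drop_succ_cons, List.drop_zero] at ih'
      rw [ih']
      simp only [pvRecsB, pvStepB, List.foldl_append]
      by_cases hseg : PySem.List.slice lines (some (i + 1)) (some q.1) = []
      · simp [hseg]
      · simp [hseg]

-- shape of pvHdrs: either ls has no header (and pvPre ls = ls), or its first header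
-- sits right after the non-header prefix
theorem hdrs_shape (ls : List String) : ∀ (off : Nat),
    (pvHdrs off ls = [] ∧ pvPre ls = ls) ∨
    (∃ b rest, pvHdrs off ls = (((off + (pvPre ls).length : Nat) : Int), b) :: rest) := by
  induction ls with
  | nil => intro off; left; simp [pvHdrs, pvPre]
  | cons l ls ih =>
    intro off
    cases hb : pvFindBookB l with
    | some b =>
      right
      refine ⟨b, pvHdrs (off + 1) ls, ?_⟩
      have hpre : pvPre (l :: ls) = [] := by simp [pvPre, List.takeWhile, hb]
      rw [hpre]
      simp [pvHdrs, hb]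
    | none =>
      have hpre : pvPre (l :: ls) = l :: pvPre ls := by simp [pvPre, List.takeWhile, hb]
      have hh : pvHdrs off (l :: ls) = pvHdrs (off + 1) ls := by simp [pvHdrs, hb]
      rcases ih (off + 1) with ⟨h1, h2⟩ | ⟨b', rest, h⟩
      · left
        refine ⟨hh.trans h1, ?_⟩
        rw [hpre, h2]
      · right
        refine ⟨b', rest, ?_⟩
        rw [hh, h, hpre]
        have hcast : (off + 1 + (pvPre ls).length : Nat)
            = (off + (l :: pvPre ls).length : Nat) := by
          simp only [List.length_cons]; omega
        rw [hcast]

theorem recs_eq (lines : List String) : ∀ (ls : List String) (off : Nat),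
    lines.drop off = ls →
    pvRecsB lines (pvHdrs off ls) = pvSaves none [] ls := by
  intro ls
  induction ls with
  | nil => intro off _; simp [pvHdrs, pvRecsB, pvSaves]
  | cons l ls ih =>
    intro off hdrop
    have hlen : off < lines.length := by
      by_contra hge
      rw [List.drop_eq_nil_of_le (by omega)] at hdrop
      exact List.cons_ne_nil l ls hdrop.symm
    have hdrop1 : lines.drop (off + 1) = ls := by
      rw [← List.drop_drop, hdrop]
      rfl
    cases hb : pvFindBookB l with
    | none =>
      have hh : pvHdrs off (l :: ls) = pvHdrs (off + 1) ls := by simp [pvHdrs, hb]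
      have hs : pvSaves none [] (l :: ls) = pvSaves none [] ls := by simp [pvSaves, hb]
      rw [hh, hs, ih (off + 1) hdrop1]
    | some b =>
      have hh : pvHdrs off (l :: ls) = ((off : Int), b) :: pvHdrs (off + 1) ls := by
        simp [pvHdrs, hb]
      have hs : pvSaves none [] (l :: ls) = pvSaves (some b) [] ls := by simp [pvSaves, hb]
      have hlslen : ls.length = lines.length - (off + 1) := by
        have hld := List.length_drop (l := lines) (i := off)
        rw [hdrop] at hld
        simp at hld
        omega
      have hpretake : pvPre ls = ls.take (pvPre ls).length :=
        List.prefix_iff_eq_take.mp (List.takeWhile_prefix _)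
      -- the slice taken for this header equals pvPre ls
      have hseg : PySem.List.slice lines (some ((off : Int) + 1))
          (some (match pvHdrs (off + 1) ls with
                 | [] => (lines.length : Int) | q :: _ => q.1)) = pvPre ls := by
        have hcast : ((off : Int) + 1) = ((off + 1 : Nat) : Int) := by push_cast; ring
        rcases hdrs_shape ls (off + 1) with ⟨h1, h2⟩ | ⟨b', rest, h⟩
        · rw [h1]
          show PySem.List.slice lines (some ((off : Int) + 1)) (some (lines.length : Int))
              = pvPre ls
          rw [hcast, PySem.List.slice_natCast, hdrop1, h2]
          rw [List.take_of_length_le (by omega)]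
        · rw [h]
          show PySem.List.slice lines (some ((off : Int) + 1))
              (some (((off + 1 + (pvPre ls).length : Nat) : Int))) = pvPre ls
          have hcast2 : (((off + 1 + (pvPre ls).length : Nat) : Int))
              = ((off + 1 : Nat) : Int) + ((pvPre ls).length : Int) := by push_cast; ring
          rw [hcast, hcast2, PySem.List.slice_natCast_add, hdrop1, ← hpretake]
      rw [hh, hs, saves_some ls b []]
      simp only [pvRecsB]
      rw [hseg, ih (off + 1) hdrop1]
      simp only [List.nil_append]

theorem mainAB (lines : List String) :
    (pvFinishA (lines.foldl pvStepA (PySem.Dict.empty, none, []))).items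
      = (((pvHeadersOf lines).zip
            (((pvHeadersOf lines).drop 1).map Prod.fst ++ [(lines.length : Int)])).foldl
          (pvStepB lines) (PySem.Dict.empty : PySem.Dict String String)).items := by
  rw [pvHeadersOf_eq, foldB, recs_eq lines lines 0 (by simp)]
  exact congrArg PySem.Dict.items (lemA lines PySem.Dict.empty none [])

-- ===== VERDICT (by name: the statement is the Claim_ definition above) =====
theorem split_into_books_spec : Claim_equal_split_into_books := by
  intro text _
  unfold Spec_split_into_books
  exact mainAB ((PySem.Str.split? text "\n").getD [])
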